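-- pv_equiv track=rewrite | github.com/nkoturovic/occams-code | scripts/repo-ingest.py | detect_architecture_signals
-- ===== SOURCE A (Python) =====
-- _MONOREPO_SIGNALS = [
--     "packages/",
--     "apps/",
--     "pnpm-workspace.yaml",
--     "turbo.json",
--     "lerna.json",
--     "nx.json",
--     "bazel-workspace",
--     "WORKSPACE",
--     "BUCK",
-- ]
--
-- _SERVICE_SIGNALS = [
--     "cmd/",
--     "internal/",
--     "api/",
--     "server/",
--     "service/",
--     "services/",
--     "deploy/",
--     "infra/",
-- ]
--
-- _FRONTEND_SIGNALS = [
--     "src/components",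
--     "src/views",
--     "pages/",
--     "app/",
--     "public/",
--     "static/",
--     "assets/",
--     "nuxt.config",
--     "next.config",
--     "vite.config",
-- ]
--
-- _LIBRARY_SIGNALS = [
--     "lib/",
--     "include/",
--     "src/lib",
--     "pkg/",
--     "dist/",
-- ]
--
-- def detect_architecture_signals(paths: list[str]) -> list[str]:
--     """Detect architecture signals from file paths."""
--     path_set = set(paths)
--     signals: list[str] = []
--
--     # Monorepo
--     mono_hits = [
--         s for s in _MONOREPO_SIGNALS if any(p.startswith(s) or s in p for p in path_set)
--     ]
--     if mono_hits:
--         signals.append(f"monorepo ({', '.join(sorted(set(mono_hits)))})")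
--
--     # Service / backend
--     svc_hits = [s for s in _SERVICE_SIGNALS if any(p.startswith(s) for p in path_set)]
--     if svc_hits:
--         signals.append(f"service/backend ({', '.join(sorted(set(svc_hits)))})")
--
--     # Frontend
--     fe_hits = [
--         s for s in _FRONTEND_SIGNALS if any(p.startswith(s) or s in p for p in path_set)
--     ]
--     if fe_hits:
--         signals.append(f"frontend ({', '.join(sorted(set(fe_hits)))})")
--
--     # Library
--     lib_hits = [s for s in _LIBRARY_SIGNALS if any(p.startswith(s) for p in path_set)]
--     if lib_hits:
--         signals.append(f"library ({', '.join(sorted(set(lib_hits)))})")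
--
--     return signals
-- ===== SOURCE B (Python) =====
-- _MONOREPO_SIGNALS = [
--     "packages/", "apps/", "pnpm-workspace.yaml", "turbo.json", "lerna.json",
--     "nx.json", "bazel-workspace", "WORKSPACE", "BUCK",
-- ]
-- _SERVICE_SIGNALS = [
--     "cmd/", "internal/", "api/", "server/", "service/", "services/", "deploy/", "infra/",
-- ]
-- _FRONTEND_SIGNALS = [
--     "src/components", "src/views", "pages/", "app/", "public/", "static/",
--     "assets/", "nuxt.config", "next.config", "vite.config",
-- ]
-- _LIBRARY_SIGNALS = ["lib/", "include/", "src/lib", "pkg/", "dist/"]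
--
-- def detect_architecture_signals(paths: list[str]) -> list[str]:
--     """Detect architecture signals with one substring search per signal over a
--     single NUL-joined corpus (paths never contain NUL): 's in corpus' is the
--     anywhere-rule and '"\0"+s in corpus' is the startswith-rule, so no loop
--     over the paths is needed at all."""
--     corpus = "\0".join([""] + paths)
--     signals: list[str] = []
--     for name, sigs, anywhere in (
--         ("monorepo", _MONOREPO_SIGNALS, True),
--         ("service/backend", _SERVICE_SIGNALS, False),
--         ("frontend", _FRONTEND_SIGNALS, True),
--         ("library", _LIBRARY_SIGNALS, False),
--     ):
--         hits = sorted(s for s in sigs if (s if anywhere else "\0" + s) in corpus)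
--         if hits:
--             signals.append(f"{name} ({', '.join(hits)})")
--     return signals
-- ===== Notes on version B (the rewrite author's own statement) =====
-- stated objective: faster
-- what changed: B never loops over the paths per signal: it concatenates all paths once into a single NUL-separated corpus string and answers each signal with one substring search on that corpus ('s in corpus' for the anywhere rule, '"\0"+s in corpus' for the startswith rule, valid because paths contain no NUL), whereas A runs a nested scan of every signal against every path in a set.
import Mathlib
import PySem

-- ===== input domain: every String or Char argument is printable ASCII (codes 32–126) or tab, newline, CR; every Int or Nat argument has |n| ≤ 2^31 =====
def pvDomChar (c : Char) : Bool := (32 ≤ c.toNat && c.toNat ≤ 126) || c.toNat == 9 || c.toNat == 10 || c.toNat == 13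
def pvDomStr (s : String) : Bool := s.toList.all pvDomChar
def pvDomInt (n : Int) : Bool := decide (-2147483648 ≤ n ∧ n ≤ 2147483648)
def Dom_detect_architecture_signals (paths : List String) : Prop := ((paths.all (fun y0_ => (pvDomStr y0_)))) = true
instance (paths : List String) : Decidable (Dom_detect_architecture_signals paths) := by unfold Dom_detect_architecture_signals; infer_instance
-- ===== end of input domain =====

-- B replaces A's nested scan (every signal against every path) by one NUL-joined
-- corpus string searched once per signal (objective: alternative algorithm).

def pvMonorepoSignals : List String :=
  ["packages/", "apps/", "pnpm-workspace.yaml", "turbo.json", "lerna.json",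
   "nx.json", "bazel-workspace", "WORKSPACE", "BUCK"]

def pvServiceSignals : List String :=
  ["cmd/", "internal/", "api/", "server/", "service/", "services/", "deploy/", "infra/"]

def pvFrontendSignals : List String :=
  ["src/components", "src/views", "pages/", "app/", "public/", "static/",
   "assets/", "nuxt.config", "next.config", "vite.config"]

def pvLibrarySignals : List String :=
  ["lib/", "include/", "src/lib", "pkg/", "dist/"]

-- ===== PORT A =====
def detect_architecture_signals (paths : List String) : List String :=
  let pathSet : PySem.Set String := PySem.Set.ofList paths
  let signals0 : List String := []
  let monoHits := pvMonorepoSignals.filter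
    (fun s => pathSet.any (fun p => PySem.Str.startswith p s || PySem.Str.isIn s p))
  let signals1 := if monoHits.isEmpty then signals0 else
    signals0 ++ ["monorepo (" ++ PySem.Str.join ", "
      (PySem.List.sorted (PySem.Set.ofList monoHits) (fun x => x) false) ++ ")"]
  let svcHits := pvServiceSignals.filter
    (fun s => pathSet.any (fun p => PySem.Str.startswith p s))
  let signals2 := if svcHits.isEmpty then signals1 else
    signals1 ++ ["service/backend (" ++ PySem.Str.join ", "
      (PySem.List.sorted (PySem.Set.ofList svcHits) (fun x => x) false) ++ ")"]
  let feHits := pvFrontendSignals.filter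
    (fun s => pathSet.any (fun p => PySem.Str.startswith p s || PySem.Str.isIn s p))
  let signals3 := if feHits.isEmpty then signals2 else
    signals2 ++ ["frontend (" ++ PySem.Str.join ", "
      (PySem.List.sorted (PySem.Set.ofList feHits) (fun x => x) false) ++ ")"]
  let libHits := pvLibrarySignals.filter
    (fun s => pathSet.any (fun p => PySem.Str.startswith p s))
  let signals4 := if libHits.isEmpty then signals3 else
    signals3 ++ ["library (" ++ PySem.Str.join ", "
      (PySem.List.sorted (PySem.Set.ofList libHits) (fun x => x) false) ++ ")"]
  signals4

-- ===== PORT B =====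
-- Source B's fixed category table: (header, signal list, anywhere-rule?)
def pvCategories : List (String × List String × Bool) :=
  [("monorepo", pvMonorepoSignals, true),
   ("service/backend", pvServiceSignals, false),
   ("frontend", pvFrontendSignals, true),
   ("library", pvLibrarySignals, false)]

def detect_architecture_signals_alt (paths : List String) : List String :=
  let corpus := PySem.Str.join "\x00" ("" :: paths)
  pvCategories.foldl (fun out cat =>
    let hits := PySem.List.sorted
      (cat.2.1.filter (fun s =>
        PySem.Str.isIn (if cat.2.2 then s else "\x00" ++ s) corpus))
      (fun x => x) false
    if hits.isEmpty then out
    else out ++ [cat.1 ++ " (" ++ PySem.Str.join ", " hits ++ ")"]) []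

-- ===== PRECONDITION & SPEC =====
def Spec_detect_architecture_signals (paths : List String) (out : List String) : Prop := out = detect_architecture_signals_alt paths
instance (paths : List String) (out : List String) : Decidable (Spec_detect_architecture_signals paths out) := by unfold Spec_detect_architecture_signals; infer_instance

-- ===== CLAIM =====
def Claim_equal_detect_architecture_signals : Prop := ∀ (paths : List String), Dom_detect_architecture_signals paths → Spec_detect_architecture_signals paths (detect_architecture_signals paths)

-- ===== LEMMAS AND PROOFS =====

-- p.startswith(s) implies s in p, so A's 'startswith or in' test equals a plain 'in' test
theorem pv_sw_or_isIn (p s : String) :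
    (PySem.Str.startswith p s || PySem.Str.isIn s p) = PySem.Str.isIn s p := by
  cases hsw : PySem.Str.startswith p s
  · simp
  · simp only [Bool.true_or]
    have hpre : s.toList <+: p.toList := by
      have := (PySem.Chars.startswith_iff p.toList s.toList).mp (by simpa using hsw)
      exact this
    have : PySem.Chars.isIn s.toList p.toList = true :=
      (PySem.Chars.isIn_iff_infix s.toList p.toList).mpr hpre.isInfix
    simpa using this.symm

-- a prefix of a++c::b avoiding c is a prefix of a
theorem pv_prefix_split {α : Type} (s : List α) (a : List α) (c : α) (b : List α)
    (hc : c ∉ s) : s <+: a ++ c :: b ↔ s <+: a := by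
  induction s generalizing a with
  | nil => simp
  | cons x s' ih =>
    cases a with
    | nil =>
      constructor
      · intro h
        rcases List.cons_prefix_cons.mp (by simpa using h) with ⟨rfl, _⟩
        exact absurd (List.mem_cons_self) hc
      · intro h; exact absurd (List.prefix_nil.mp h) (by simp)
    | cons y a' =>
      rw [List.cons_append, List.cons_prefix_cons, List.cons_prefix_cons,
        ih a' (fun h => hc (List.mem_cons_of_mem _ h))]

-- an infix of a++c::b avoiding c lies in a or in b
theorem pv_infix_split {α : Type} (s : List α) (a : List α) (c : α) (b : List α)
    (hc : c ∉ s) : s <:+: a ++ c :: b ↔ s <:+: a ∨ s <:+: b := by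
  induction a with
  | nil =>
    simp only [List.nil_append, List.infix_cons_iff]
    constructor
    · rintro (h | h)
      · have hs : s = [] := by
          cases s with
          | nil => rfl
          | cons x s' =>
            rcases List.cons_prefix_cons.mp h with ⟨rfl, _⟩
            exact absurd (List.mem_cons_self) hc
        subst hs; exact Or.inl List.nil_infix
      · exact Or.inr h
    · rintro (h | h)
      · have hs : s = [] := List.infix_nil.mp h
        subst hs; exact Or.inr List.nil_infix
      · exact Or.inr h
  | cons y a' ih =>
    rw [List.cons_append, List.infix_cons_iff, ← List.cons_append,
      pv_prefix_split s (y :: a') c b hc, ih, List.infix_cons_iff]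
    tauto

-- an infix starting with c, in a++c::b where c ∉ a, lies in c::b
theorem pv_infix_joint {α : Type} (s : List α) (a : List α) (c : α) (b : List α)
    (ha : c ∉ a) : c :: s <:+: a ++ c :: b ↔ c :: s <:+: c :: b := by
  induction a with
  | nil => simp
  | cons x a' ih =>
    rw [List.cons_append, List.infix_cons_iff]
    constructor
    · rintro (h | h)
      · rcases List.cons_prefix_cons.mp h with ⟨rfl, _⟩
        exact absurd List.mem_cons_self ha
      · exact (ih (fun h' => ha (List.mem_cons_of_mem _ h'))).mp h
    · intro h
      exact Or.inr ((ih (fun h' => ha (List.mem_cons_of_mem _ h'))).mpr h)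

-- a nonempty c-free string is an infix of the c-joined corpus iff it is an infix of a part
theorem pv_join_infix (c : Char) (s : List Char) :
    ∀ ps : List (List Char), (∀ p ∈ ps, c ∉ p) → c ∉ s → s ≠ [] →
      (s <:+: PySem.Chars.join [c] ps ↔ ∃ p ∈ ps, s <:+: p) := by
  intro ps
  induction ps with
  | nil =>
    intro _ _ hne
    rw [PySem.Chars.join_nil]
    simp [List.infix_nil, hne]
  | cons p rest ih =>
    intro hps hcs hne
    cases rest with
    | nil =>
      rw [PySem.Chars.join_singleton]
      simp
    | cons q rest' =>
      rw [PySem.Chars.join_cons_cons, List.append_assoc,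
        show ([c] ++ PySem.Chars.join [c] (q :: rest')) = c :: PySem.Chars.join [c] (q :: rest') from rfl,
        pv_infix_split s p c _ hcs,
        ih (fun r hr => hps r (List.mem_cons_of_mem _ hr)) hcs hne]
      constructor
      · rintro (h | ⟨r, hr, h⟩)
        · exact ⟨p, List.mem_cons_self, h⟩
        · exact ⟨r, List.mem_cons_of_mem _ hr, h⟩
      · rintro ⟨r, hr, h⟩
        rcases List.mem_cons.mp hr with rfl | hr'
        · exact Or.inl h
        · exact Or.inr ⟨r, hr', h⟩

-- c::s is an infix of c :: (c-joined parts) iff s is a prefix of some part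
theorem pv_join_prefix (c : Char) (s : List Char) :
    ∀ ps : List (List Char), (∀ p ∈ ps, c ∉ p) → c ∉ s → s ≠ [] →
      (c :: s <:+: c :: PySem.Chars.join [c] ps ↔ ∃ p ∈ ps, s <+: p) := by
  intro ps
  induction ps with
  | nil =>
    intro _ _ hne
    rw [PySem.Chars.join_nil, List.infix_cons_iff]
    constructor
    · rintro (h | h)
      · rcases List.cons_prefix_cons.mp h with ⟨_, h'⟩
        exact absurd (List.prefix_nil.mp h') hne
      · exact absurd (List.infix_nil.mp h) (by simp)
    · rintro ⟨_, h, _⟩; exact absurd h (by simp)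
  | cons p rest ih =>
    intro hps hcs hne
    have hcp : c ∉ p := hps p List.mem_cons_self
    cases rest with
    | nil =>
      rw [PySem.Chars.join_singleton, List.infix_cons_iff]
      constructor
      · rintro (h | h)
        · rcases List.cons_prefix_cons.mp h with ⟨_, h'⟩
          exact ⟨p, List.mem_cons_self, h'⟩
        · exact absurd (h.subset List.mem_cons_self) hcp
      · rintro ⟨r, hr, h⟩
        rcases List.mem_cons.mp hr with rfl | hr'
        · exact Or.inl (List.cons_prefix_cons.mpr ⟨rfl, h⟩)
        · exact absurd hr' (by simp)
    | cons q rest' =>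
      rw [PySem.Chars.join_cons_cons, List.append_assoc,
        show ([c] ++ PySem.Chars.join [c] (q :: rest')) = c :: PySem.Chars.join [c] (q :: rest') from rfl,
        List.infix_cons_iff,
        pv_infix_joint (s) p c _ hcp,
        ih (fun r hr => hps r (List.mem_cons_of_mem _ hr)) hcs hne,
        List.cons_prefix_cons,
        pv_prefix_split s p c _ hcs]
      constructor
      · rintro (⟨_, h⟩ | ⟨r, hr, h⟩)
        · exact ⟨p, List.mem_cons_self, h⟩
        · exact ⟨r, List.mem_cons_of_mem _ hr, h⟩
      · rintro ⟨r, hr, h⟩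
        rcases List.mem_cons.mp hr with rfl | hr'
        · exact Or.inl ⟨rfl, h⟩
        · exact Or.inr ⟨r, hr', h⟩

-- the NUL separator
def pvSep : Char := Char.ofNat 0

theorem pv_dom_no_sep (paths : List String)
    (hdom : Dom_detect_architecture_signals paths) :
    ∀ p ∈ paths, pvSep ∉ p.toList := by
  intro p hp hmem
  have h1 : pvDomStr p = true := by
    have := (List.all_eq_true.mp hdom) p hp
    simpa using this
  have h2 : pvDomChar pvSep = true := (List.all_eq_true.mp h1) _ hmem
  exact absurd h2 (by decide)

theorem pv_corpus_toList (paths : List String) :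
    (PySem.Str.join "\x00" ("" :: paths)).toList
      = PySem.Chars.join [pvSep] ([] :: paths.map String.toList) := by
  rw [PySem.Str.toList_join]
  rfl

-- A's anywhere-test over the path set equals B's one search in the corpus
theorem pv_pred_any (paths : List String) (s : String)
    (hp : ∀ p ∈ paths, pvSep ∉ p.toList) (hcs : pvSep ∉ s.toList) (hne : s.toList ≠ []) :
    (PySem.Set.ofList paths).any (fun p => PySem.Str.startswith p s || PySem.Str.isIn s p)
      = PySem.Str.isIn s (PySem.Str.join "\x00" ("" :: paths)) := by
  simp only [pv_sw_or_isIn]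
  rw [Bool.eq_iff_iff, List.any_eq_true, PySem.Str.isIn_iff_infix, pv_corpus_toList,
    pv_join_infix pvSep s.toList ([] :: paths.map String.toList)
      (by
        intro q hq
        rcases List.mem_cons.mp hq with rfl | hq'
        · simp
        · rcases List.mem_map.mp hq' with ⟨p, hpmem, rfl⟩
          exact hp p hpmem)
      hcs hne]
  constructor
  · rintro ⟨p, hpm, h⟩
    refine ⟨p.toList, List.mem_cons_of_mem _ (List.mem_map_of_mem ((PySem.Set.mem_ofList paths p).mp hpm)), ?_⟩
    exact (PySem.Str.isIn_iff_infix s p).mp h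
  · rintro ⟨q, hq, h⟩
    rcases List.mem_cons.mp hq with rfl | hq'
    · exact absurd (List.infix_nil.mp h) hne
    · rcases List.mem_map.mp hq' with ⟨p, hpmem, rfl⟩
      exact ⟨p, (PySem.Set.mem_ofList paths p).mpr hpmem,
        (PySem.Str.isIn_iff_infix s p).mpr h⟩

-- A's startswith-test over the path set equals B's one search for NUL+s in the corpus
theorem pv_pred_pre (paths : List String) (s : String)
    (hp : ∀ p ∈ paths, pvSep ∉ p.toList) (hcs : pvSep ∉ s.toList) (hne : s.toList ≠ []) :
    (PySem.Set.ofList paths).any (fun p => PySem.Str.startswith p s)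
      = PySem.Str.isIn ("\x00" ++ s) (PySem.Str.join "\x00" ("" :: paths)) := by
  have htl : ("\x00" ++ s).toList = pvSep :: s.toList := by
    simp; rfl
  cases paths with
  | nil =>
    rw [Bool.eq_iff_iff, List.any_eq_true, PySem.Str.isIn_iff_infix, htl, pv_corpus_toList]
    simp only [List.map_nil, PySem.Chars.join_singleton]
    constructor
    · rintro ⟨p, hpm, _⟩
      exact absurd ((PySem.Set.mem_ofList [] p).mp hpm) (by simp)
    · intro h
      exact absurd (List.infix_nil.mp h) (by simp)
  | cons p0 rest =>
    rw [Bool.eq_iff_iff, List.any_eq_true, PySem.Str.isIn_iff_infix, htl, pv_corpus_toList,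
      List.map_cons, PySem.Chars.join_cons_cons, List.nil_append,
      show ([pvSep] ++ PySem.Chars.join [pvSep] (p0.toList :: rest.map String.toList))
          = pvSep :: PySem.Chars.join [pvSep] (p0.toList :: rest.map String.toList) from rfl,
      ← List.map_cons,
      pv_join_prefix pvSep s.toList ((p0 :: rest).map String.toList)
        (by
          intro q hq
          rcases List.mem_map.mp hq with ⟨p, hpmem, rfl⟩
          exact hp p hpmem)
        hcs hne]
    constructor
    · rintro ⟨p, hpm, h⟩
      refine ⟨p.toList, List.mem_map_of_mem ((PySem.Set.mem_ofList _ p).mp hpm), ?_⟩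
      exact (PySem.Chars.startswith_iff p.toList s.toList).mp (by simpa using h)
    · rintro ⟨q, hq, h⟩
      rcases List.mem_map.mp hq with ⟨p, hpmem, rfl⟩
      refine ⟨p, (PySem.Set.mem_ofList _ p).mpr hpmem, ?_⟩
      have := (PySem.Chars.startswith_iff p.toList s.toList).mpr h
      simpa using this

-- a category's sorted hit list and emptiness agree between the two ports
theorem pv_cat (sig : List String)
    (hnd : sig.Nodup)
    (predA : String → Bool) (predB : String → Bool)
    (heq : ∀ s ∈ sig, predA s = predB s) :
    PySem.List.sorted (PySem.Set.ofList (sig.filter predA)) (fun x => x) false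
        = PySem.List.sorted (sig.filter predB) (fun x => x) false
      ∧ (sig.filter predA).isEmpty
        = (PySem.List.sorted (sig.filter predB) (fun x => x) false).isEmpty := by
  rw [List.filter_congr heq,
    PySem.Set.ofList_eq_self_of_nodup _ (hnd.filter _)]
  refine ⟨rfl, ?_⟩
  rw [Bool.eq_iff_iff]
  simp only [List.isEmpty_iff_length_eq_zero, PySem.List.length_sorted]

-- ===== VERDICT (by name: the statement is the Claim_ definition above) =====
theorem detect_architecture_signals_spec : Claim_equal_detect_architecture_signals := by
  intro paths hdom
  have hp := pv_dom_no_sep paths hdom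
  unfold Spec_detect_architecture_signals detect_architecture_signals detect_architecture_signals_alt
  have hmono := pv_cat pvMonorepoSignals (by decide)
    (fun s => (PySem.Set.ofList paths).any (fun p => PySem.Str.startswith p s || PySem.Str.isIn s p))
    (fun s => PySem.Str.isIn s (PySem.Str.join "\x00" ("" :: paths)))
    (fun s hs => pv_pred_any paths s hp
      ((by decide : ∀ s ∈ pvMonorepoSignals, pvSep ∉ s.toList ∧ s.toList ≠ []) s hs).1
      ((by decide : ∀ s ∈ pvMonorepoSignals, pvSep ∉ s.toList ∧ s.toList ≠ []) s hs).2)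
  have hsvc := pv_cat pvServiceSignals (by decide)
    (fun s => (PySem.Set.ofList paths).any (fun p => PySem.Str.startswith p s))
    (fun s => PySem.Str.isIn ("\x00" ++ s) (PySem.Str.join "\x00" ("" :: paths)))
    (fun s hs => pv_pred_pre paths s hp
      ((by decide : ∀ s ∈ pvServiceSignals, pvSep ∉ s.toList ∧ s.toList ≠ []) s hs).1
      ((by decide : ∀ s ∈ pvServiceSignals, pvSep ∉ s.toList ∧ s.toList ≠ []) s hs).2)
  have hfe := pv_cat pvFrontendSignals (by decide)
    (fun s => (PySem.Set.ofList paths).any (fun p => PySem.Str.startswith p s || PySem.Str.isIn s p))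
    (fun s => PySem.Str.isIn s (PySem.Str.join "\x00" ("" :: paths)))
    (fun s hs => pv_pred_any paths s hp
      ((by decide : ∀ s ∈ pvFrontendSignals, pvSep ∉ s.toList ∧ s.toList ≠ []) s hs).1
      ((by decide : ∀ s ∈ pvFrontendSignals, pvSep ∉ s.toList ∧ s.toList ≠ []) s hs).2)
  have hlib := pv_cat pvLibrarySignals (by decide)
    (fun s => (PySem.Set.ofList paths).any (fun p => PySem.Str.startswith p s))
    (fun s => PySem.Str.isIn ("\x00" ++ s) (PySem.Str.join "\x00" ("" :: paths)))
    (fun s hs => pv_pred_pre paths s hp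
      ((by decide : ∀ s ∈ pvLibrarySignals, pvSep ∉ s.toList ∧ s.toList ≠ []) s hs).1
      ((by decide : ∀ s ∈ pvLibrarySignals, pvSep ∉ s.toList ∧ s.toList ≠ []) s hs).2)
  simp only [pvCategories, List.foldl_cons, List.foldl_nil]
  rw [hmono.1, hmono.2, hsvc.1, hsvc.2, hfe.1, hfe.2, hlib.1, hlib.2]
  simp only [show ("monorepo" ++ " (" : String) = "monorepo (" from rfl,
    show ("service/backend" ++ " (" : String) = "service/backend (" from rfl,
    show ("frontend" ++ " (" : String) = "frontend (" from rfl,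
    show ("library" ++ " (" : String) = "library (" from rfl]
  rfl
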